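-- pv_equiv track=rewrite | github.com/jiarui-liu/ANLP-NER | model/scibert/finetune.py | select_major_vote
-- ===== SOURCE A (Python) =====
-- def select_major_vote(pred_tmp):
--     pred_sel = None
--     counts = {}
--     for l in pred_tmp:
--         counts[l] = counts.get(l, 0) + 1
--     counts = {k: v for k, v in sorted(counts.items(), key=lambda item: item[1])}
--     for idx, k in enumerate(counts):
--         if idx == 0:
--             if k != 0:
--                 pred_sel = k
--                 break
--             else:
--                 continue
--         if idx == 1:
--             pred_sel = k
--     if pred_sel is None:
--         pred_sel = 0
--     return pred_sel
-- ===== SOURCE B (Python) =====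
-- def select_major_vote(pred_tmp):
--     counts = {}
--     for l in pred_tmp:
--         counts[l] = counts.get(l, 0) + 1
--     if not counts:
--         return 0
--     first = min(counts, key=lambda k: counts[k])
--     if first != 0:
--         return first
--     rest = [k for k in counts if k != first]
--     if not rest:
--         return 0
--     return min(rest, key=lambda k: counts[k])
-- ===== Notes on version B (the rewrite author's own statement) =====
-- stated objective: simpler
-- what changed: B replaces A's stable sort of the count dict plus an enumerate-with-break/continue scan by two direct min()-selections: the first-minimal key, and if it is 0, the first-minimal among the remaining keys (0 when none exist).
import Mathlib
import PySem

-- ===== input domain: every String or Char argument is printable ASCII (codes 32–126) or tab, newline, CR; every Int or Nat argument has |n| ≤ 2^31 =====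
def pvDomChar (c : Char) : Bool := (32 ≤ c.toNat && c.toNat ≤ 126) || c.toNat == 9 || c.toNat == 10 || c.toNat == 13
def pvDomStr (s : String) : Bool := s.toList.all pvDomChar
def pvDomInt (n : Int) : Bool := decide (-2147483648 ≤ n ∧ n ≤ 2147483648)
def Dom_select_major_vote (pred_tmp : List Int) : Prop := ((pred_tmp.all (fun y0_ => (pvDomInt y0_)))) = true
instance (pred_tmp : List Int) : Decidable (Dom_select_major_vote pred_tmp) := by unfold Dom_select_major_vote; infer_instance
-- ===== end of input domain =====

-- B replaces A's stable sort of the counts plus an enumerate/break scan by two direct first-minimal selections (simpler).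

-- ===== PORT A =====
-- the 'for idx, k in enumerate(counts)' loop, with its break/continue, as structural recursion
def pvLoopA : List (Int × Int) → Option Int → Option Int
  | [], sel => sel
  | (idx, k) :: rest, sel =>
    if idx = 0 then
      (if k ≠ 0 then some k else pvLoopA rest sel)
    else if idx = 1 then pvLoopA rest (some k)
    else pvLoopA rest sel

def select_major_vote (pred_tmp : List Int) : Int :=
  let pred_sel : Option Int := none
  let counts : PySem.Dict Int Int :=
    pred_tmp.foldl (fun d l => d.insert l (d.getD l 0 + 1)) PySem.Dict.empty
  let counts2 : PySem.Dict Int Int :=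
    PySem.Dict.ofList (PySem.List.sorted counts.items (fun item => item.2) false)
  let pred_sel := pvLoopA (PySem.List.enumerate counts2.keys 0) pred_sel
  pred_sel.getD 0

-- ===== PORT B =====
def select_major_vote_alt (pred_tmp : List Int) : Int :=
  let counts : PySem.Dict Int Int :=
    pred_tmp.foldl (fun d l => d.insert l (d.getD l 0 + 1)) PySem.Dict.empty
  if counts.size = 0 then 0
  else
    match PySem.List.min? counts.keys (fun k => counts.getD k 0) with
    | none => 0
    | some first =>
      if first ≠ 0 then first
      else
        let rest := counts.keys.filter (fun k => k ≠ first)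
        match PySem.List.min? rest (fun k => counts.getD k 0) with
        | none => 0
        | some second => second

-- ===== PRECONDITION & SPEC =====
def Spec_select_major_vote (pred_tmp : List Int) (out : Int) : Prop := out = select_major_vote_alt pred_tmp
instance (pred_tmp : List Int) (out : Int) : Decidable (Spec_select_major_vote pred_tmp out) := by unfold Spec_select_major_vote; infer_instance

-- ===== CLAIM (what is proved, stated in full; the proofs are below) =====
def Claim_equal_select_major_vote : Prop := ∀ (pred_tmp : List Int), Dom_select_major_vote pred_tmp → Spec_select_major_vote pred_tmp (select_major_vote pred_tmp)

-- ===== LEMMAS AND PROOFS =====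

-- how one insertion step of A's stable sort transforms the first two elements
def pvTop2 (t : List (Int × Int)) (x : Int × Int) : List (Int × Int) :=
  match t with
  | [] => [x]
  | [a] => if x.2 < a.2 then [x, a] else [a, x]
  | a :: b :: _ => if x.2 < a.2 then [x, a] else if x.2 < b.2 then [a, x] else [a, b]

def pvBefore (x y : Int × Int) : Bool := decide (x.2 < y.2)

theorem pv_take2_insertBy (x : Int × Int) (ys : List (Int × Int)) :
    (PySem.List.insertBy pvBefore x ys).take 2 = pvTop2 (ys.take 2) x := by
  match ys with
  | [] => simp [PySem.List.insertBy, pvTop2]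
  | [a] =>
    simp only [PySem.List.insertBy, pvBefore, pvTop2]
    split_ifs <;> simp_all
  | a :: b :: rest =>
    simp only [PySem.List.insertBy, pvBefore, pvTop2]
    split_ifs <;> simp_all <;> split_ifs <;> simp_all <;> omega

theorem pv_take2_foldl_insertBy (xs : List (Int × Int)) (acc : List (Int × Int)) :
    (xs.foldl (fun acc x => PySem.List.insertBy pvBefore x acc) acc).take 2 =
      xs.foldl pvTop2 (acc.take 2) := by
  induction xs generalizing acc with
  | nil => rfl
  | cons x xs ih => simp only [List.foldl_cons, ih, pv_take2_insertBy]

theorem pv_sorted_take2 (xs : List (Int × Int)) :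
    (PySem.List.sorted xs (fun p => p.2) false).take 2 = xs.foldl pvTop2 [] := by
  simpa [PySem.List.sorted, pvBefore] using pv_take2_foldl_insertBy xs []

-- min? over xs ++ [x] applies one more fold step
theorem pv_min?_concat (xs : List (Int × Int)) (x : Int × Int) :
    PySem.List.min? (xs ++ [x]) (fun p => p.2) =
      match PySem.List.min? xs (fun p => p.2) with
      | none => some x
      | some m => if x.2 < m.2 then some x else some m := by
  rcases hm : PySem.List.min? xs (fun p => p.2) with _ | m <;>
    simp only [PySem.List.min?] at hm ⊢ <;> rw [List.foldl_append, hm] <;> rfl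

-- invariant tying the first two elements of the stable sort to the two min?-selections of B
def pvInv (xs : List (Int × Int)) : Prop :=
  match xs.foldl pvTop2 [] with
  | [] => xs = []
  | [a] => xs = [a]
  | [a, b] =>
      PySem.List.min? xs (fun p => p.2) = some a ∧
      (xs.Nodup → PySem.List.min? (xs.erase a) (fun p => p.2) = some b)
  | _ => False

theorem pvInv_holds (xs : List (Int × Int)) : pvInv xs := by
  induction xs using List.reverseRecOn with
  | nil => simp [pvInv]
  | append_singleton xs x ih =>
    unfold pvInv at ih ⊢
    rw [List.foldl_append]
    simp only [List.foldl_cons, List.foldl_nil]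
    rcases h2 : xs.foldl pvTop2 [] with _ | ⟨a, _ | ⟨b, rest⟩⟩
    · rw [h2] at ih; subst ih; simp [pvTop2, PySem.List.min?]
    · rw [h2] at ih; subst ih
      simp only [pvTop2]
      split_ifs with h
      · refine ⟨by simp [PySem.List.min?, h], fun hnd => ?_⟩
        have hax : a ≠ x := by rintro rfl; omega
        have hx : ([a] ++ [x]).erase x = [a] := by
          simp [List.erase_cons, hax]
        rw [hx]; simp [PySem.List.min?]
      · refine ⟨by simp [PySem.List.min?, h], fun hnd => ?_⟩
        have hx : ([a] ++ [x]).erase a = [x] := by simp [List.erase_cons]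
        rw [hx]; simp [PySem.List.min?]
    · rw [h2] at ih
      rcases rest with _ | _
      · obtain ⟨hmin, herase⟩ := ih
        have hmem : a ∈ xs := PySem.List.min?_mem hmin
        simp only [pvTop2]
        split_ifs with h1 h2'
        · refine ⟨by rw [pv_min?_concat, hmin]; simp [h1], fun hnd => ?_⟩
          have hxnot : x ∉ xs := by
            have hd := (List.nodup_append.mp hnd).2.2
            exact fun hx => hd x hx x (List.mem_singleton_self x) rfl
          have hx : (xs ++ [x]).erase x = xs := by
            rw [List.erase_append_right _ hxnot]; simp
          rw [hx, hmin]
        · refine ⟨by rw [pv_min?_concat, hmin]; simp [h1], fun hnd => ?_⟩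
          have hnx : xs.Nodup := (List.nodup_append.mp hnd).1
          have hx : (xs ++ [x]).erase a = xs.erase a ++ [x] :=
            List.erase_append_left _ hmem
          rw [hx, pv_min?_concat, herase hnx]
          simp [h2']
        · refine ⟨by rw [pv_min?_concat, hmin]; simp [h1], fun hnd => ?_⟩
          have hnx : xs.Nodup := (List.nodup_append.mp hnd).1
          have hx : (xs ++ [x]).erase a = xs.erase a ++ [x] :=
            List.erase_append_left _ hmem
          rw [hx, pv_min?_concat, herase hnx]
          simp [h2']
      · exact absurd ih (by simp)

-- min? commutes with map (generic selection fold fact)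
theorem pv_min?_map_aux {α β : Type} (l : List α) (f : α → β) (k : β → Int) (acc : Option α) :
    l.foldl (fun (acc : Option β) (a : α) =>
        match acc with
        | none => some (f a)
        | some m => if k (f a) < k m then some (f a) else some m) (acc.map f) =
      (l.foldl (fun (acc : Option α) (a : α) =>
        match acc with
        | none => some a
        | some m => if k (f a) < k (f m) then some a else some m) acc).map f := by
  induction l generalizing acc with
  | nil => rfl
  | cons a l ih =>
    simp only [List.foldl_cons]
    rcases acc with _ | m
    · exact ih (some a)
    · simp only [Option.map_some]
      rw [show (if k (f a) < k (f m) then some (f a) else some (f m)) =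
            Option.map f (if k (f a) < k (f m) then some a else some m) by
          split_ifs <;> rfl]
      exact ih _

theorem pv_min?_map {α β : Type} (l : List α) (f : α → β) (k : β → Int) :
    PySem.List.min? (l.map f) k = (PySem.List.min? l (fun a => k (f a))).map f := by
  simp only [PySem.List.min?, List.foldl_map]
  exact pv_min?_map_aux l f k none

-- min? only depends on key values on the list
theorem pv_min?_congr_aux {α : Type} (l : List α) (k1 k2 : α → Int)
    (h : ∀ x ∈ l, k1 x = k2 x) (acc : Option α) (hacc : ∀ m, acc = some m → k1 m = k2 m) :
    l.foldl (fun (acc : Option α) (x : α) =>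
        match acc with
        | none => some x
        | some m => if k1 x < k1 m then some x else some m) acc =
      l.foldl (fun (acc : Option α) (x : α) =>
        match acc with
        | none => some x
        | some m => if k2 x < k2 m then some x else some m) acc := by
  induction l generalizing acc with
  | nil => rfl
  | cons a l ih =>
    simp only [List.foldl_cons]
    have ha := h a (by simp)
    rcases acc with _ | m
    · exact ih (fun x hx => h x (by simp [hx])) (some a)
        (by rintro m hm; cases hm; exact ha)
    · have hm := hacc m rfl
      simp only [ha, hm]
      exact ih (fun x hx => h x (by simp [hx])) _
        (by rintro m' hm'; split at hm' <;> cases hm' <;> [exact ha; exact hm])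

theorem pv_min?_congr {α : Type} (l : List α) (k1 k2 : α → Int)
    (h : ∀ x ∈ l, k1 x = k2 x) :
    PySem.List.min? l k1 = PySem.List.min? l k2 := by
  simp only [PySem.List.min?]
  exact pv_min?_congr_aux l k1 k2 h none (by simp)

-- A's loop ignores all entries with index ≥ 2
theorem pvLoopA_skip (l : List (Int × Int)) (sel : Option Int)
    (h : ∀ p ∈ l, 2 ≤ p.1) : pvLoopA l sel = sel := by
  induction l with
  | nil => rfl
  | cons p l ih =>
    obtain ⟨idx, k⟩ := p
    have h0 := h (idx, k) (by simp)
    simp only [pvLoopA]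
    rw [if_neg (by omega), if_neg (by omega)]
    exact ih (fun p hp => h p (by simp [hp]))

-- closed description of A's enumerate loop
theorem pvLoopA_char (ks : List Int) :
    (pvLoopA (PySem.List.enumerate ks 0) none).getD 0 =
      match ks with
      | [] => 0
      | k0 :: rest =>
        if k0 ≠ 0 then k0 else (match rest with | [] => 0 | k1 :: _ => k1) := by
  rcases ks with _ | ⟨k0, _ | ⟨k1, rest⟩⟩
  · rfl
  · simp only [PySem.List.enumerate_cons, PySem.List.enumerate_nil, pvLoopA]
    split_ifs <;> simp_all [pvLoopA]
  · have hskip : pvLoopA (PySem.List.enumerate rest 2) (some k1) = some k1 := by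
      apply pvLoopA_skip
      intro p hp
      rw [PySem.List.mem_enumerate_iff] at hp
      obtain ⟨k, _, rfl⟩ := hp
      have hk : (2:Int) ≤ 2 + (k:Int) := by omega
      simpa using hk
    by_cases h : k0 = 0 <;>
      simp [PySem.List.enumerate_cons, pvLoopA, h, hskip]

-- ===== VERDICT (by name: the statement is the Claim_ definition above) =====
theorem select_major_vote_spec : Claim_equal_select_major_vote := by
  intro pred_tmp _
  unfold Spec_select_major_vote select_major_vote select_major_vote_alt
  simp only [PySem.Dict.foldl_insert_getD_add_one_eq_counter]
  set C := PySem.Dict.counter pred_tmp with hC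
  have hnd : C.keys.Nodup := PySem.Dict.nodup_keys_counter pred_tmp
  have hkeys : C.keys = C.items.map (fun p => p.1) := rfl
  have hnd_items : C.items.Nodup := (hkeys ▸ hnd).of_map
  set S := PySem.List.sorted C.items (fun item => item.2) false with hS
  have hperm : S.Perm C.items := PySem.List.sorted_perm _ _ _
  have hndS : (S.map (fun p => p.1)).Nodup := ((hperm.map _).nodup_iff).mpr (hkeys ▸ hnd)
  have hks : (PySem.Dict.ofList S : PySem.Dict Int Int).keys = S.map (fun p => p.1) := by
    show (PySem.Dict.empty.update S).keys = _
    unfold PySem.Dict.update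
    rw [PySem.Dict.keys_foldl_insert_key]
    exact PySem.Set.ofList_eq_self_of_nodup _ hndS
  rw [hks, pvLoopA_char]
  have hT2 : S.take 2 = C.items.foldl pvTop2 [] := pv_sorted_take2 C.items
  have hinv := pvInv_holds C.items
  unfold pvInv at hinv
  rw [← hT2] at hinv
  have hgetd : ∀ p ∈ C.items, C.getD p.1 0 = p.2 := by
    intro p hp
    exact PySem.Dict.getD_of_mem_items C (by simpa using hp) hnd 0
  have hminB : PySem.List.min? C.keys (fun k => C.getD k 0) =
      (PySem.List.min? C.items (fun p => p.2)).map (fun p => p.1) := by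
    rw [hkeys, pv_min?_map]
    congr 1
    exact pv_min?_congr _ _ _ (fun p hp => by rw [hgetd p hp])
  rcases hs : S with _ | ⟨p, _ | ⟨q, rest⟩⟩
  · -- no distinct values at all: both return 0
    have hitems : C.items = [] := List.Perm.eq_nil (hs ▸ hperm).symm
    have hsz : C.size = 0 := by simp [PySem.Dict.size, hitems]
    simp [hsz]
  · -- a single distinct value p.1
    have hitems : C.items = [p] := List.perm_singleton.mp (hs ▸ hperm).symm
    have hsz : ¬ C.size = 0 := by simp [PySem.Dict.size, hitems]
    have hmin1 : PySem.List.min? C.items (fun p => p.2) = some p := by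
      rw [hitems]; simp [PySem.List.min?]
    rw [if_neg hsz, hminB, hmin1]
    simp only [Option.map_some]
    by_cases h0 : p.1 = 0
    · simp [h0, hkeys, hitems, PySem.List.min?]
    · simp [h0]
  · -- at least two distinct values
    have hlen : C.items.length = S.length := (hperm.length_eq).symm
    have hsz : ¬ C.size = 0 := by
      have : C.items.length = (p :: q :: rest).length := by rw [hlen, hs]
      simp [PySem.Dict.size, this]
    have h2 : S.take 2 = [p, q] := by rw [hs]; rfl
    rw [h2] at hinv
    obtain ⟨hminA, heraseA⟩ := hinv
    have herase := heraseA hnd_items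
    have hpmem : p ∈ C.items := PySem.List.min?_mem hminA
    rw [if_neg hsz, hminB, hminA]
    simp only [Option.map_some]
    by_cases h0 : p.1 = 0
    · have hfilter : C.keys.filter (fun k => k ≠ p.1) =
          (C.items.erase p).map (fun a => a.1) := by
        rw [hkeys, List.filter_map, hnd_items.erase_eq_filter p]
        congr 1
        apply List.filter_congr
        intro a ha
        have hbne : (a != p) = decide (¬ a = p) := by
          by_cases hap : a = p <;> simp [hap]
        simp only [Function.comp, ne_eq, hbne]
        apply decide_eq_decide.mpr
        constructor
        · exact fun hne heq => hne (congrArg (fun r => r.1) heq)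
        · intro hne heq
          exact hne (List.inj_on_of_nodup_map (hkeys ▸ hnd) ha hpmem heq)
      have hmin2 : PySem.List.min? ((C.items.erase p).map (fun a => a.1))
          (fun k => C.getD k 0) = some q.1 := by
        rw [pv_min?_map,
          pv_min?_congr (C.items.erase p) _ (fun a => a.2)
            (fun a ha => hgetd a (List.mem_of_mem_erase ha)), herase]
        rfl
      rw [h0] at hfilter
      simp only [ne_eq, decide_not] at hfilter
      simp [h0, hfilter, hmin2]
    · simp [h0]
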